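-- pv_equiv track=rewrite | github.com/mwoss/algorithms | leet_code_must_have/reverse_words_in_string.py | _clean_spaces
-- ===== SOURCE A (Python) =====
-- def _clean_spaces(arr: list):
--     i, j = 0, 0
--     while j < len(arr):
--         while j < len(arr) and arr[j] == " ":
--             j += 1
--         while j < len(arr) and arr[j] != " ":
--             arr[i] = arr[j]
--             i += 1
--             j += 1
--         while j < len(arr) and arr[j] == " ":
--             j += 1
--         if j < len(arr):
--             arr[i] = " "
--             i += 1
--
--     return arr[:i]
-- ===== SOURCE B (Python) =====
-- def _clean_spaces(arr: list):
--     # Split on space elements, drop empty groups, then join the words with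
--     # single spaces; finally write the result back over arr's prefix (same
--     # in-place effect as the original two-pointer compaction).
--     words = []
--     cur = []
--     for x in arr:
--         if x == " ":
--             if cur:
--                 words.append(cur)
--                 cur = []
--         else:
--             cur.append(x)
--     if cur:
--         words.append(cur)
--     cleaned = []
--     for w in words:
--         if cleaned:
--             cleaned.append(" ")
--         cleaned += w
--     arr[:len(cleaned)] = cleaned
--     return cleaned
-- ===== Notes on version B (the rewrite author's own statement) =====
-- stated objective: alternative
-- what changed: A compacts the list in place with a two-pointer read/write walk over nested inner while-loops and returns the written prefix; B splits the list into words on space elements with one accumulator pass and then joins the words with single spaces (writing the result back over arr's prefix, the same in-place effect).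
import Mathlib
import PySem

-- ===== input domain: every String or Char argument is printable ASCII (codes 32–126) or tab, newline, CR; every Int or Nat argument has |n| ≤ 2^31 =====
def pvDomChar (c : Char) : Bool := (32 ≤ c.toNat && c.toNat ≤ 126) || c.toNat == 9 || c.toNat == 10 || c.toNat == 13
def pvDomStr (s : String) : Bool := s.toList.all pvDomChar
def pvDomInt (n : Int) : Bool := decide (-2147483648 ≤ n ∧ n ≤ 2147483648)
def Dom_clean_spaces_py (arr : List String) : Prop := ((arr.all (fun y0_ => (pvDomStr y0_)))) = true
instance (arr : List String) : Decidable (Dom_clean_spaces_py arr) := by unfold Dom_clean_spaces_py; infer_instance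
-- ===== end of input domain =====

-- B replaces A's in-place two-pointer compaction by a split-into-words /
-- join-with-single-spaces pipeline (objective: idiomatic/alternative, same cost);
-- the equivalence proved here is about the RETURN value only — both Pythons also
-- overwrite arr's prefix with the cleaned content, identically.

-- ===== PORT A =====
-- inner while: skip elements equal to " " (fuel is only a totality device;
-- arr.length is always enough fuel, the loop guard is unchanged)
def pvSkip (arr : List String) (j fuel : Nat) : Nat :=
  match fuel with
  | 0 => j
  | f + 1 => if j < arr.length ∧ arr.getD j "" = " " then pvSkip arr (j + 1) f else j

-- inner while: copy the word arr[i] = arr[j]; i += 1; j += 1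
def pvCopy (arr : List String) (i j fuel : Nat) : List String × Nat × Nat :=
  match fuel with
  | 0 => (arr, i, j)
  | f + 1 =>
    if j < arr.length ∧ arr.getD j "" ≠ " " then
      pvCopy (arr.set i (arr.getD j "")) (i + 1) (j + 1) f
    else (arr, i, j)

-- outer while loop of A; returns (arr, i)
def pvOuter (arr : List String) (i j fuel : Nat) : List String × Nat :=
  match fuel with
  | 0 => (arr, i)
  | f + 1 =>
    if j < arr.length then
      let j1 := pvSkip arr j arr.length
      let r := pvCopy arr i j1 arr.length
      let j3 := pvSkip r.1 r.2.2 r.1.length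
      if j3 < r.1.length then pvOuter (r.1.set r.2.1 " ") (r.2.1 + 1) j3 f
      else (r.1, r.2.1)
    else (arr, i)

def clean_spaces_py (arr : List String) : List String :=
  let r := pvOuter arr 0 0 arr.length
  r.1.take r.2

-- ===== PORT B =====
-- first loop of B: split arr on " " elements, state = (words, cur)
def pvStep (st : List (List String) × List String) (x : String) :
    List (List String) × List String :=
  if x = " " then (if st.2 ≠ [] then (st.1 ++ [st.2], ([] : List String)) else st)
  else (st.1, st.2 ++ [x])

-- second loop of B: join the words with single spaces
def pvJoinStep (acc : List String) (w : List String) : List String :=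
  (if acc ≠ [] then acc ++ [" "] else acc) ++ w

def clean_spaces_py_alt (arr : List String) : List String :=
  let st := arr.foldl pvStep ([], [])
  let words := if st.2 ≠ [] then st.1 ++ [st.2] else st.1
  words.foldl pvJoinStep []

-- ===== PRECONDITION & SPEC =====
def Spec_clean_spaces_py (arr : List String) (out : List String) : Prop := out = clean_spaces_py_alt arr
instance (arr : List String) (out : List String) : Decidable (Spec_clean_spaces_py arr out) := by unfold Spec_clean_spaces_py; infer_instance

-- ===== CLAIM (what is proved, stated in full; the proofs are below) =====
def Claim_equal_clean_spaces_py : Prop := ∀ (arr : List String), Dom_clean_spaces_py arr → Spec_clean_spaces_py arr (clean_spaces_py arr)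

-- ===== LEMMAS AND PROOFS =====

-- the common functional specification: the list of words, then their join
def pvWords (l : List String) : List (List String) :=
  let l1 := l.dropWhile (fun s => s == " ")
  if _h : l1 = [] then []
  else (l1.takeWhile (fun s => s != " ")) ::
       pvWords ((l1.dropWhile (fun s => s != " ")).dropWhile (fun s => s == " "))
termination_by l.length
decreasing_by
  have h1 : l.dropWhile (fun s => s == " ") ≠ [] := _h
  obtain ⟨x, t, hx⟩ := List.exists_cons_of_ne_nil h1
  have hlen1 : (l.dropWhile (fun s => s == " ")).length ≤ l.length := List.length_dropWhile_le ..
  have hlen2 : ((l.dropWhile (fun s => s == " ")).dropWhile (fun s => s != " ")).length ≤ t.length := by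
    have hxh : (fun s => s != " ") x = true := by
      have := List.head_dropWhile_not (fun s => s == " ") h1
      simp only [hx] at this ⊢
      simpa using this
    rw [hx, List.dropWhile_cons, if_pos hxh]
    exact List.length_dropWhile_le ..
  have hlen3 := List.length_dropWhile_le (fun s => s == " ")
      ((l.dropWhile (fun s => s == " ")).dropWhile (fun s => s != " "))
  have : t.length + 1 = (l.dropWhile (fun s => s == " ")).length := by rw [hx]; simp
  omega

def pvJ (l : List String) : List String :=
  match pvWords l with
  | [] => []
  | w :: ws => w ++ ws.flatMap (fun u => " " :: u)

theorem pvWords_nil : pvWords [] = [] := by rw [pvWords]; simp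

theorem pvJ_nil : pvJ [] = [] := by unfold pvJ; rw [pvWords_nil]

theorem take_set_succ (l : List String) (v : String) (i : Nat) (h : i < l.length) :
    (l.set i v).take (i+1) = l.take i ++ [v] := by
  rw [List.take_add_one, List.take_set, List.getElem?_set_self']
  simp [List.getElem?_eq_getElem h]
  exact List.set_eq_of_length_le (by simp)

theorem drop_set_lt (l : List String) (v : String) (i j : Nat) (h : i < j) :
    (l.set i v).drop j = l.drop j := by
  rw [List.drop_set, if_pos h]

theorem dropWhile_head_false {α : Type} (p : α → Bool) (l : List α) (y : α) (t : List α)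
    (h : l.dropWhile p = y :: t) : p y = false := by
  induction l with
  | nil => simp at h
  | cons x xs ih =>
    rw [List.dropWhile_cons] at h
    by_cases hx : p x = true
    · rw [if_pos hx] at h; exact ih h
    · rw [if_neg hx] at h
      cases h
      simpa using hx

theorem pvWords_ne_nil (l : List String) (hl : l.dropWhile (fun s => s == " ") ≠ []) :
    pvWords l ≠ [] := by
  rw [pvWords]
  simp only [dif_neg hl]
  exact List.cons_ne_nil _ _

theorem pvJ_eq (l : List String) :
    pvJ l =
      if _h : l.dropWhile (fun s => s == " ") = [] then []
      else
        (l.dropWhile (fun s => s == " ")).takeWhile (fun s => s != " ") ++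
          (if ((l.dropWhile (fun s => s == " ")).dropWhile (fun s => s != " ")).dropWhile
                (fun s => s == " ") = [] then []
           else " " :: pvJ (((l.dropWhile (fun s => s == " ")).dropWhile (fun s => s != " ")).dropWhile
                (fun s => s == " "))) := by
  unfold pvJ
  rw [pvWords]
  by_cases h : l.dropWhile (fun s => s == " ") = []
  · simp [h]
  · simp only [dif_neg h]
    set l2 := ((l.dropWhile (fun s => s == " ")).dropWhile (fun s => s != " ")).dropWhile
        (fun s => s == " ") with hl2
    by_cases h2 : l2 = []
    · rw [h2, pvWords_nil]; simp
    · have hwne : pvWords l2 ≠ [] := by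
        apply pvWords_ne_nil
        rw [hl2, List.dropWhile_idempotent]
        exact h2
      simp only [if_neg h2]
      cases hw2 : pvWords l2 with
      | nil => exact absurd hw2 hwne
      | cons w2 ws2 => simp

-- ----- A-side -----
theorem pvSkip_ge (arr : List String) (j fuel : Nat) : j ≤ pvSkip arr j fuel := by
  fun_induction pvSkip arr j fuel with
  | case1 j => exact le_rfl
  | case2 j f h ih => omega
  | case3 j f h => exact le_rfl

theorem pvSkip_gt (arr : List String) (j fuel : Nat)
    (h : j < arr.length ∧ arr.getD j "" = " ") (hf : arr.length ≤ j + fuel) :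
    j + 1 ≤ pvSkip arr j fuel := by
  cases fuel with
  | zero => omega
  | succ f =>
    simp only [pvSkip, if_pos h]
    exact pvSkip_ge arr (j + 1) f

theorem pvSkip_drop (arr : List String) (j fuel : Nat) :
    arr.length ≤ j + fuel →
    arr.drop (pvSkip arr j fuel) = (arr.drop j).dropWhile (fun s => s == " ") := by
  fun_induction pvSkip arr j fuel with
  | case1 j =>
    intro hf
    rw [List.drop_eq_nil_of_le (by omega)]
    rfl
  | case2 j f h ih =>
    intro hf
    rw [ih (by omega)]
    rw [← List.getElem_cons_drop h.1, List.dropWhile_cons]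
    have : arr[j] = " " := by rw [← List.getD_eq_getElem arr "" h.1]; exact h.2
    simp [this]
  | case3 j f h =>
    intro hf
    by_cases hj : j < arr.length
    · have hne : arr.getD j "" ≠ " " := fun hc => h ⟨hj, hc⟩
      rw [← List.getElem_cons_drop hj, List.dropWhile_cons]
      have : ¬ (arr[j] == " ") = true := by
        rw [← List.getD_eq_getElem arr "" hj]; simpa using hne
      simp [this]
    · rw [List.drop_eq_nil_of_le (by omega)]
      rfl

theorem pvCopy_len (arr : List String) (i j fuel : Nat) :
    (pvCopy arr i j fuel).1.length = arr.length := by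
  fun_induction pvCopy arr i j fuel with
  | case1 arr i j => rfl
  | case2 arr i j f h ih => simpa [List.length_set] using ih
  | case3 arr i j f h => rfl

theorem pvCopy_ge (arr : List String) (i j fuel : Nat) : j ≤ (pvCopy arr i j fuel).2.2 := by
  fun_induction pvCopy arr i j fuel with
  | case1 arr i j => exact le_rfl
  | case2 arr i j f h ih => omega
  | case3 arr i j f h => exact le_rfl

theorem pvCopy_stop (arr : List String) (i j fuel : Nat) :
    arr.length ≤ j + fuel →
    ¬ ((pvCopy arr i j fuel).2.2 < (pvCopy arr i j fuel).1.length ∧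
       (pvCopy arr i j fuel).1.getD (pvCopy arr i j fuel).2.2 "" ≠ " ") := by
  fun_induction pvCopy arr i j fuel with
  | case1 arr i j =>
    intro hf hc
    obtain ⟨h1, -⟩ := hc
    simp only [] at h1
    omega
  | case2 arr i j f h ih =>
    intro hf
    exact ih (by simp [List.length_set]; omega)
  | case3 arr i j f h =>
    intro _
    exact h

theorem pvCopy_spec (arr : List String) (i j fuel : Nat) :
    i ≤ j → arr.length ≤ j + fuel →
    (pvCopy arr i j fuel).1.take (pvCopy arr i j fuel).2.1 =
        arr.take i ++ (arr.drop j).takeWhile (fun s => s != " ") ∧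
    (pvCopy arr i j fuel).1.drop (pvCopy arr i j fuel).2.2 =
        (arr.drop j).dropWhile (fun s => s != " ") ∧
    (pvCopy arr i j fuel).2.1 ≤ (pvCopy arr i j fuel).2.2 := by
  fun_induction pvCopy arr i j fuel with
  | case1 arr i j =>
    intro hij hf
    rw [List.drop_eq_nil_of_le (by omega)]
    exact ⟨by simp, by simp, hij⟩
  | case2 arr i j f h ih =>
    intro hij hf
    obtain ⟨P1, P2, P3⟩ := ih (by omega) (by simp [List.length_set]; omega)
    have hjlen : j < arr.length := h.1
    have hilen : i < arr.length := lt_of_le_of_lt hij hjlen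
    have hv : arr.getD j "" = arr[j] := List.getD_eq_getElem arr "" hjlen
    have hpred : (arr[j] != " ") = true := by
      have := h.2; rw [hv] at this; simpa using this
    have hdropj : arr.drop j = arr[j] :: arr.drop (j+1) := (List.getElem_cons_drop hjlen).symm
    have htake : (arr.set i (arr.getD j "")).take (i+1) = arr.take i ++ [arr[j]] := by
      rw [hv]; exact take_set_succ arr arr[j] i hilen
    have hdrop : (arr.set i (arr.getD j "")).drop (j+1) = arr.drop (j+1) :=
      drop_set_lt arr _ i (j+1) (by omega)
    refine ⟨?_, ?_, P3⟩
    · rw [P1, htake, hdrop, hdropj, List.takeWhile_cons, if_pos hpred]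
      simp
    · rw [P2, hdrop, hdropj, List.dropWhile_cons, if_pos hpred]
  | case3 arr i j f h =>
    intro hij hf
    by_cases hj : j < arr.length
    · have heq : arr.getD j "" = " " := by
        by_contra hc; exact h ⟨hj, hc⟩
      have hdropj : arr.drop j = arr[j] :: arr.drop (j+1) := (List.getElem_cons_drop hj).symm
      have hpred : ¬ (arr[j] != " ") = true := by
        rw [← List.getD_eq_getElem arr "" hj, heq]; simp
      refine ⟨?_, ?_, hij⟩
      · rw [hdropj, List.takeWhile_cons, if_neg hpred]; simp
      · rw [hdropj, List.dropWhile_cons, if_neg hpred]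
    · rw [List.drop_eq_nil_of_le (by omega)]
      exact ⟨by simp, by simp, hij⟩

theorem pvOuter_spec (arr : List String) (i j fuel : Nat) :
    i ≤ j → arr.length ≤ j + fuel →
    (pvOuter arr i j fuel).1.take (pvOuter arr i j fuel).2 = arr.take i ++ pvJ (arr.drop j) := by
  fun_induction pvOuter arr i j fuel with
  | case1 arr i j =>
    intro hij hf
    rw [List.drop_eq_nil_of_le (by omega), pvJ_nil, List.append_nil]
  | case2 arr i j f h j1 r j3 h2 ih =>
    intro hij hf
    have hj1f : arr.length ≤ j + arr.length := by omega
    have hj1 : j ≤ j1 := pvSkip_ge arr j arr.length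
    obtain ⟨P1, P2, P3⟩ := pvCopy_spec arr i j1 arr.length (le_trans hij hj1) (by omega)
    have hreq : r = pvCopy arr i j1 arr.length := rfl
    rw [← hreq] at P1 P2 P3
    have hrlen : r.1.length = arr.length := by rw [hreq]; exact pvCopy_len arr i j1 arr.length
    have hj1j2 : j1 ≤ r.2.2 := by rw [hreq]; exact pvCopy_ge arr i j1 arr.length
    have hj2j3 : r.2.2 ≤ j3 := pvSkip_ge r.1 r.2.2 r.1.length
    have hj2len : r.2.2 < arr.length := by omega
    have hstopc := pvCopy_stop arr i j1 arr.length (by omega)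
    rw [← hreq] at hstopc
    have hsp : r.1.getD r.2.2 "" = " " := by
      by_contra hc
      exact hstopc ⟨by omega, hc⟩
    have hj2j3' : r.2.2 + 1 ≤ j3 := pvSkip_gt r.1 r.2.2 r.1.length ⟨by omega, hsp⟩ (by omega)
    have hij3 : r.2.1 < j3 := by omega
    have hdrop3 : (r.1.set r.2.1 " ").drop j3 = r.1.drop j3 := drop_set_lt _ _ _ _ hij3
    have htake3 : (r.1.set r.2.1 " ").take (r.2.1 + 1) = r.1.take r.2.1 ++ [" "] :=
      take_set_succ r.1 " " r.2.1 (by omega)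
    have hskip3 : r.1.drop j3 = (r.1.drop r.2.2).dropWhile (fun s => s == " ") :=
      pvSkip_drop r.1 r.2.2 r.1.length (by omega)
    have := ih (by omega) (by simp only [List.length_set]; omega)
    rw [this, htake3, hdrop3, P1]
    have hl1 : arr.drop j1 = (arr.drop j).dropWhile (fun s => s == " ") :=
      pvSkip_drop arr j arr.length (by omega)
    have hl1ne : (arr.drop j).dropWhile (fun s => s == " ") ≠ [] := by
      rw [← hl1]
      have : j1 < arr.length := by omega
      intro hc
      have := congrArg List.length hc
      simp at this
      omega
    have hl2 : r.1.drop j3 =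
        (((arr.drop j).dropWhile (fun s => s == " ")).dropWhile (fun s => s != " ")).dropWhile
          (fun s => s == " ") := by
      rw [hskip3, P2, hl1]
    have hl2ne : (((arr.drop j).dropWhile (fun s => s == " ")).dropWhile (fun s => s != " ")).dropWhile
          (fun s => s == " ") ≠ [] := by
      rw [← hl2]
      intro hc
      have := congrArg List.length hc
      simp at this
      omega
    rw [pvJ_eq (arr.drop j)]
    rw [dif_neg hl1ne, if_neg hl2ne, ← hl2, hl1]
    simp
  | case3 arr i j f h j1 r j3 h2 =>
    intro hij hf
    have hj1 : j ≤ j1 := pvSkip_ge arr j arr.length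
    obtain ⟨P1, P2, P3⟩ := pvCopy_spec arr i j1 arr.length (le_trans hij hj1) (by omega)
    have hreq : r = pvCopy arr i j1 arr.length := rfl
    rw [← hreq] at P1 P2 P3
    have hrlen : r.1.length = arr.length := by rw [hreq]; exact pvCopy_len arr i j1 arr.length
    have hj1j2 : j1 ≤ r.2.2 := by rw [hreq]; exact pvCopy_ge arr i j1 arr.length
    have hskip3 : r.1.drop j3 = (r.1.drop r.2.2).dropWhile (fun s => s == " ") :=
      pvSkip_drop r.1 r.2.2 r.1.length (by omega)
    have hl1 : arr.drop j1 = (arr.drop j).dropWhile (fun s => s == " ") :=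
      pvSkip_drop arr j arr.length (by omega)
    have hdropnil : r.1.drop j3 = [] := List.drop_eq_nil_of_le (by omega)
    rw [P1, pvJ_eq (arr.drop j)]
    by_cases hl1e : (arr.drop j).dropWhile (fun s => s == " ") = []
    · rw [dif_pos hl1e, hl1, hl1e]
      simp
    · rw [dif_neg hl1e]
      have hl2nil : (((arr.drop j).dropWhile (fun s => s == " ")).dropWhile (fun s => s != " ")).dropWhile
          (fun s => s == " ") = [] := by
        rw [← hl1, ← P2, ← hskip3]; exact hdropnil
      rw [if_pos hl2nil, ← hl1]
      simp
  | case4 arr i j f h =>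
    intro hij hf
    rw [List.drop_eq_nil_of_le (by omega), pvJ_nil, List.append_nil]

theorem A_eq_pvJ (arr : List String) : clean_spaces_py arr = pvJ arr := by
  unfold clean_spaces_py
  have := pvOuter_spec arr 0 0 arr.length le_rfl (by omega)
  simpa using this

-- ----- B-side -----
def pvFin (st : List (List String) × List String) : List (List String) :=
  if st.2 ≠ [] then st.1 ++ [st.2] else st.1

theorem pvB_prefix (l : List String) :
    ∀ ws cur, pvFin (l.foldl pvStep (ws, cur)) = ws ++ pvFin (l.foldl pvStep ([], cur)) := by
  induction l with
  | nil => intro ws cur; by_cases h : cur = [] <;> simp [pvFin, h]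
  | cons x t ih =>
    intro ws cur
    simp only [List.foldl_cons]
    by_cases hx : x = " "
    · by_cases hc : cur = []
      · simp only [pvStep, if_pos hx, hc]
        simpa using ih ws []
      · simp only [pvStep, if_pos hx, if_pos hc, List.nil_append]
        rw [ih (ws ++ [cur]) [], ih [cur] []]
        simp
    · simp only [pvStep, if_neg hx]
      exact ih ws (cur ++ [x])

theorem pvB_skip (l : List String) :
    ∀ ws, pvFin ((l.dropWhile (fun s => s == " ")).foldl pvStep (ws, [])) =
      pvFin (l.foldl pvStep (ws, [])) := by
  induction l with
  | nil => intro ws; rfl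
  | cons x t ih =>
    intro ws
    by_cases hx : x = " "
    · rw [List.dropWhile_cons, if_pos (by simp [hx])]
      simp only [List.foldl_cons, pvStep, if_pos hx]
      simpa using ih ws
    · rw [List.dropWhile_cons, if_neg (by simp [hx])]

theorem pvB_word (w : List String) :
    ∀ ws cur, (∀ x ∈ w, x ≠ " ") → w.foldl pvStep (ws, cur) = (ws, cur ++ w) := by
  induction w with
  | nil => intro ws cur _; simp
  | cons x t ih =>
    intro ws cur hall
    have hx : x ≠ " " := hall x (by simp)
    simp only [List.foldl_cons, pvStep, if_neg hx]
    rw [ih ws (cur ++ [x]) (fun y hy => hall y (by simp [hy]))]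
    simp

theorem pvB_words (n : Nat) : ∀ l : List String, l.length ≤ n →
    pvFin (l.foldl pvStep ([], [])) = pvWords l := by
  induction n with
  | zero =>
    intro l hl
    have : l = [] := List.eq_nil_of_length_eq_zero (by omega)
    subst this
    rw [pvWords_nil]; rfl
  | succ n ih =>
    intro l hl
    rw [pvWords, ← pvB_skip l []]
    set l1 := l.dropWhile (fun s => s == " ") with hl1
    by_cases h : l1 = []
    · rw [h]; simp [pvFin]
    · simp only [dif_neg h]
      have hsplit : l1.takeWhile (fun s => s != " ") ++ l1.dropWhile (fun s => s != " ") = l1 :=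
        List.takeWhile_append_dropWhile
      set w := l1.takeWhile (fun s => s != " ") with hw
      set r := l1.dropWhile (fun s => s != " ") with hr
      have hwall : ∀ x ∈ w, x ≠ " " := by
        intro x hx
        have := List.all_takeWhile (p := fun s => s != " ") (l := l1)
        rw [← hw] at this
        have := List.all_eq_true.mp this x hx
        simpa using this
      have hwne : w ≠ [] := by
        obtain ⟨y, t, hy⟩ := List.exists_cons_of_ne_nil h
        have hyp : (fun s => s != " ") y = true := by
          have := dropWhile_head_false (fun s => s == " ") l y t (by rw [← hl1]; exact hy)
          simpa using this
        rw [hw, hy, List.takeWhile_cons, if_pos hyp]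
        exact List.cons_ne_nil _ _
      have hfold1 : l1.foldl pvStep (([] : List (List String)), ([] : List String)) =
          r.foldl pvStep ([], w) := by
        conv_lhs => rw [← hsplit]
        rw [List.foldl_append, pvB_word w [] [] hwall]
        simp
      rw [hfold1]
      cases hrc : r with
      | nil =>
        simp only [List.foldl_nil, pvFin, if_pos hwne]
        simp [pvWords_nil]
      | cons x r' =>
        have hxsp : x = " " := by
          have := dropWhile_head_false (fun s => s != " ") l1 x r' (by rw [← hr]; exact hrc)
          simpa using this
        simp only [List.foldl_cons, pvStep, if_pos hxsp, if_pos hwne, List.nil_append]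
        rw [pvB_prefix r' [w] [], ← pvB_skip r' []]
        rw [hxsp, List.dropWhile_cons, if_pos (by simp)]
        have hlen : (r'.dropWhile (fun s => s == " ")).length ≤ n := by
          have h1 : l1.length ≤ l.length := List.length_dropWhile_le ..
          have h2 : w.length + r.length = l1.length := by
            rw [← hsplit]; simp
          have h3 : (r'.dropWhile (fun s => s == " ")).length ≤ r'.length :=
            List.length_dropWhile_le ..
          have h4 : r.length = r'.length + 1 := by rw [hrc]; simp
          have h5 : 1 ≤ w.length := List.length_pos_of_ne_nil hwne
          omega
        rw [ih (r'.dropWhile (fun s => s == " ")) hlen]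
        simp
  
theorem pvWords_mem_ne (l : List String) : ∀ w ∈ pvWords l, w ≠ [] := by
  fun_induction pvWords l with
  | case1 l l1 h => simp
  | case2 l l1 h ih =>
    intro w hw
    rw [List.mem_cons] at hw
    cases hw with
    | inr hw => exact ih w hw
    | inl hw =>
      subst hw
      obtain ⟨y, t, hy⟩ := List.exists_cons_of_ne_nil h
      have hyp : (fun s => s != " ") y = true := by
        have := dropWhile_head_false (fun s => s == " ") l y t hy
        simpa using this
      rw [hy, List.takeWhile_cons, if_pos hyp]
      exact List.cons_ne_nil _ _

theorem pvB_join_sub (ws : List (List String)) :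
    ∀ acc, acc ≠ [] → ws.foldl pvJoinStep acc = acc ++ ws.flatMap (fun u => " " :: u) := by
  induction ws with
  | nil => intro acc _; simp
  | cons w rest ih =>
    intro acc hacc
    simp only [List.foldl_cons, pvJoinStep, if_pos hacc]
    rw [ih (acc ++ [" "] ++ w) (by simp)]
    simp

theorem B_eq_pvJ (arr : List String) : clean_spaces_py_alt arr = pvJ arr := by
  unfold clean_spaces_py_alt pvJ
  dsimp only
  have hw : (if (arr.foldl pvStep ([], [])).2 ≠ [] then
      (arr.foldl pvStep ([], [])).1 ++ [(arr.foldl pvStep ([], [])).2]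
      else (arr.foldl pvStep ([], [])).1) = pvWords arr := by
    have := pvB_words arr.length arr le_rfl
    simpa [pvFin] using this
  rw [hw]
  cases hws : pvWords arr with
  | nil => rfl
  | cons w rest =>
    have hwne : w ≠ [] := pvWords_mem_ne arr w (by rw [hws]; simp)
    simp only [List.foldl_cons, pvJoinStep]
    simp only [ne_eq, not_true_eq_false, List.nil_append]
    rw [if_neg (by simp)]
    simp only [List.nil_append]
    exact pvB_join_sub rest w hwne

-- ===== VERDICT (by name: the statement is the Claim_ definition above) =====
theorem clean_spaces_py_spec : Claim_equal_clean_spaces_py := by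
  intro arr _
  unfold Spec_clean_spaces_py
  rw [A_eq_pvJ, B_eq_pvJ]
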